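-- pv_equiv track=rewrite | github.com/LA-JP-Support/hugo-boilerplate | scripts/remove_inner_hrs.py | remove_inner_hrs_from_text
-- ===== SOURCE A (Python) =====
-- from typing import Iterable
--
-- def remove_inner_hrs_from_text(lines: Iterable[str]) -> str:
--     """Return text with body-only '---' lines removed.
--
--     - Preserves the first front matter block starting at line 0.
--     - After front matter is closed, removes any line whose stripped content is exactly '---'.
--     """
--
--     out: list[str] = []
--     in_front_matter = False
--     front_done = False
--
--     for idx, raw in enumerate(lines):
--         line = raw.rstrip("\n")
--         stripped = line.strip()
--
--         # Detect start of front matter only at very top of file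
--         if idx == 0 and stripped == "---":
--             in_front_matter = True
--             out.append(line)
--             continue
--
--         # Detect end of front matter
--         if in_front_matter and stripped == "---":
--             in_front_matter = False
--             front_done = True
--             out.append(line)
--             continue
--
--         # After front matter, drop any standalone '---' line
--         if front_done and not in_front_matter and stripped == "---":
--             continue
--
--         out.append(line)
--
--     return "\n".join(out) + "\n"
-- ===== SOURCE B (Python) =====
-- def remove_inner_hrs_from_text(lines):
--     ls = [raw.rstrip("\n") for raw in lines]
--     if ls and ls[0].strip() == "---":
--         close = next((i for i, l in enumerate(ls[1:], 1) if l.strip() == "---"), None)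
--         if close is not None:
--             ls = ls[:close + 1] + [l for l in ls[close + 1:] if l.strip() != "---"]
--     return "\n".join(ls) + "\n"
-- ===== Notes on version B (the rewrite author's own statement) =====
-- stated objective: simpler
-- what changed: Replaces A's per-line three-flag state machine with a direct decomposition: find the index of the front-matter closing '---', keep the prefix verbatim and filter '---' lines from the suffix.
import Mathlib
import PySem

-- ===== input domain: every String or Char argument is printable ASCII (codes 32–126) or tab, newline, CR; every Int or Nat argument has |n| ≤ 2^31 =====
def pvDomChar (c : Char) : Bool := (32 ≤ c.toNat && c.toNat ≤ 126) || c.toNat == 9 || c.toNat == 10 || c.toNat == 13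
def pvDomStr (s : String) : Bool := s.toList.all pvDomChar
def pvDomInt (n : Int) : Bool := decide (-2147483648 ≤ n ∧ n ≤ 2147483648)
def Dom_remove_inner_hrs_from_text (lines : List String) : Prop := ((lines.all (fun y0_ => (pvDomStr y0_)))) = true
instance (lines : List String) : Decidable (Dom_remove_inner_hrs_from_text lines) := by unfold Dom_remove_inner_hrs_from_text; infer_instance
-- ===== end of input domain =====

-- B replaces A's three-flag state machine by find-the-closing-delimiter then take/filter (simpler decomposition, same O(n) cost).

-- hand port of raw.rstrip("\n"): drop the trailing '\n' characters (exact: rstrip with the single-char set "\n")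
def rstripNl (s : String) : String :=
  String.ofList ((s.toList.reverse.dropWhile (fun c => c == '\n')).reverse)

-- ===== PORT A =====
-- the for-loop of A as structural recursion over the remaining lines, carrying idx, out, in_front_matter, front_done
def removeGoA : Int → List String → List String → Bool → Bool → List String
  | _, [], out, _, _ => out
  | idx, raw :: rest, out, in_fm, front_done =>
    let line := rstripNl raw
    let stripped := PySem.Str.strip line
    if idx = 0 ∧ stripped = "---" then
      removeGoA (idx + 1) rest (out ++ [line]) true front_done
    else if in_fm = true ∧ stripped = "---" then
      removeGoA (idx + 1) rest (out ++ [line]) false true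
    else if front_done = true ∧ in_fm = false ∧ stripped = "---" then
      removeGoA (idx + 1) rest out in_fm front_done
    else
      removeGoA (idx + 1) rest (out ++ [line]) in_fm front_done

def remove_inner_hrs_from_text (lines : List String) : String :=
  PySem.Str.join "\n" (removeGoA 0 lines [] false false) ++ "\n"

-- ===== PORT B =====
def remove_inner_hrs_from_text_alt (lines : List String) : String :=
  let ls := lines.map rstripNl
  let ls' :=
    match ls with
    | [] => ls
    | first :: tail =>
      if PySem.Str.strip first = "---" then
        match tail.findIdx? (fun l => PySem.Str.strip l == "---") with
        | some j =>
          -- close = j + 1 (index into ls); keep ls[:close+1], filter '---' out of ls[close+1:]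
          ls.take (j + 2) ++ (ls.drop (j + 2)).filter (fun l => !(PySem.Str.strip l == "---"))
        | none => ls
      else ls
  PySem.Str.join "\n" ls' ++ "\n"

-- ===== PRECONDITION & SPEC =====
def Spec_remove_inner_hrs_from_text (lines : List String) (out : String) : Prop := out = remove_inner_hrs_from_text_alt lines
instance (lines : List String) (out : String) : Decidable (Spec_remove_inner_hrs_from_text lines out) := by unfold Spec_remove_inner_hrs_from_text; infer_instance

-- ===== CLAIM (what is proved, stated in full; the proofs are below) =====
def Claim_equal_remove_inner_hrs_from_text : Prop := ∀ (lines : List String), Dom_remove_inner_hrs_from_text lines → Spec_remove_inner_hrs_from_text lines (remove_inner_hrs_from_text lines)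

-- ===== LEMMAS AND PROOFS =====

-- after front matter closed, A filters out '---' lines
lemma removeGoA_FT (rest : List String) : ∀ (out : List String) (idx : Int), 1 ≤ idx →
    removeGoA idx rest out false true
      = out ++ (rest.map rstripNl).filter (fun l => !(PySem.Str.strip l == "---")) := by
  induction rest with
  | nil => intro out idx _; simp [removeGoA]
  | cons r rest ih =>
    intro out idx hidx
    by_cases h : PySem.Str.strip (rstripNl r) = "---" <;>
      simp [removeGoA, h, ih _ (idx + 1) (by omega)] <;> all_goals (intros; omega)

-- with no front matter opened, A keeps every (rstripped) line
lemma removeGoA_FF (rest : List String) : ∀ (out : List String) (idx : Int), 1 ≤ idx →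
    removeGoA idx rest out false false = out ++ rest.map rstripNl := by
  induction rest with
  | nil => intro out idx _; simp [removeGoA]
  | cons r rest ih =>
    intro out idx hidx
    simp [removeGoA, ih _ (idx + 1) (by omega)]
    all_goals (intros; omega)

-- inside front matter, A keeps lines up to and including the closing '---', then filters the remainder
lemma removeGoA_TF (rest : List String) : ∀ (out : List String) (idx : Int), 1 ≤ idx →
    removeGoA idx rest out true false
      = match (rest.map rstripNl).findIdx? (fun l => PySem.Str.strip l == "---") with
        | none => out ++ rest.map rstripNl
        | some j => out ++ (rest.map rstripNl).take (j + 1)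
            ++ ((rest.map rstripNl).drop (j + 1)).filter (fun l => !(PySem.Str.strip l == "---")) := by
  induction rest with
  | nil => intro out idx _; simp [removeGoA]
  | cons r rest ih =>
    intro out idx hidx
    by_cases h : PySem.Str.strip (rstripNl r) = "---"
    · simp [removeGoA, h, List.findIdx?_cons,
        removeGoA_FT rest _ (idx + 1) (by omega)]
      all_goals (intros; omega)
    · have e1 : removeGoA idx (r :: rest) out true false
          = removeGoA (idx + 1) rest (out ++ [rstripNl r]) true false := by
        simp [removeGoA, h]; all_goals (intros; omega)
      rw [e1, ih _ (idx + 1) (by omega)]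
      cases hf : (rest.map rstripNl).findIdx? (fun l => PySem.Str.strip l == "---") with
      | none => simp [hf, List.findIdx?_cons, h]
      | some j => simp [hf, List.findIdx?_cons, h, List.take_succ_cons, List.drop_succ_cons]

-- ===== VERDICT (by name: the statement is the Claim_ definition above) =====
theorem remove_inner_hrs_from_text_spec : Claim_equal_remove_inner_hrs_from_text := by
  intro lines _
  unfold Spec_remove_inner_hrs_from_text remove_inner_hrs_from_text remove_inner_hrs_from_text_alt
  cases lines with
  | nil => rfl
  | cons x rest =>
    by_cases h : PySem.Str.strip (rstripNl x) = "---"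
    · have e1 : removeGoA 0 (x :: rest) [] false false
          = removeGoA 1 rest [rstripNl x] true false := by simp [removeGoA, h]
      rw [e1, removeGoA_TF rest [rstripNl x] 1 (by omega)]
      cases hf : (rest.map rstripNl).findIdx? (fun l => PySem.Str.strip l == "---") with
      | none => simp [hf, h]
      | some j => simp [hf, h, List.take_succ_cons, List.drop_succ_cons]
    · have e1 : removeGoA 0 (x :: rest) [] false false
          = removeGoA 1 rest [rstripNl x] false false := by simp [removeGoA, h]
      rw [e1, removeGoA_FF rest [rstripNl x] 1 (by omega)]
      simp [h]
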